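-- pv_equiv track=rewrite | github.com/JoshHumpherey/EPIJudge | epi_judge_python_solutions/sunset_view.py | examine_buildings_with_sunset
-- ===== SOURCE A (Python) =====
-- def examine_buildings_with_sunset(sequence):
--     current_max = sequence[0]
--     current_count = 1
--     for i in range(1, len(sequence)):
--         if sequence[i] > current_max:
--             current_max = sequence[i]
--             current_count += 1
--     return current_count
-- ===== SOURCE B (Python) =====
-- def examine_buildings_with_sunset(sequence):
--     prefix_max = []
--     m = sequence[0]
--     for x in sequence:
--         m = max(m, x)
--         prefix_max.append(m)
--     return len(set(prefix_max))
-- ===== Notes on version B (the rewrite author's own statement) =====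
-- stated objective: alternative
-- what changed: B builds the table of running prefix maxima in one pass and returns the number of distinct values in it (the prefix-max sequence is non-decreasing, so its distinct count equals 1 + the number of strict increases A counts), instead of A's inline branch-counting loop over indices.
import Mathlib
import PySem

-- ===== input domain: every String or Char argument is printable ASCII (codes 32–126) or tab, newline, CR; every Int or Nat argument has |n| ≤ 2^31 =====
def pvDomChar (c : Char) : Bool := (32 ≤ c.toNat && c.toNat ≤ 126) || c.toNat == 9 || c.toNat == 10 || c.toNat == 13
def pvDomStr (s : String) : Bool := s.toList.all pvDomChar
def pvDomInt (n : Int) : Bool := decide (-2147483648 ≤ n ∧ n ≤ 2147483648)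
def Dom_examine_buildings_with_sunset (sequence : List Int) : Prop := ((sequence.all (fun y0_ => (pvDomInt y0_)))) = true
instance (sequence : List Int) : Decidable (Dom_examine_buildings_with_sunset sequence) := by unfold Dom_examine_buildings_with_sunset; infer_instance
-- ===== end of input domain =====

-- B builds the list of running prefix maxima and returns its distinct-value count
-- instead of A's inline branch-counting loop (objective: alternative decomposition).


-- ===== PORT A =====
-- sequence[0] raises IndexError on []; that input is excluded by Pre_, the default 0 is never used there
def examine_buildings_with_sunset (sequence : List Int) : Int :=
  let current_max := PySem.List.pyGetD sequence 0 0
  let st := (PySem.List.pyRange 1 (sequence.length : Int) 1).foldl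
    (fun (st : Int × Int) i =>
      let v := PySem.List.pyGetD sequence i 0
      if v > st.1 then (v, st.2 + 1) else st)
    (current_max, 1)
  st.2

-- ===== PORT B =====
def examine_buildings_with_sunset_alt (sequence : List Int) : Int :=
  let m0 := PySem.List.pyGetD sequence 0 0   -- sequence[0]: IndexError on [], excluded by Pre_
  let prefix_max := (sequence.foldl
    (fun (acc : List Int × Int) x =>
      let m := max acc.2 x
      (acc.1 ++ [m], m)) ([], m0)).1
  ((PySem.Set.ofList prefix_max).length : Int)

-- ===== PRECONDITION & SPEC =====
-- Pre_ excludes only the empty list, on which A raises IndexError at sequence[0].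
def Pre_examine_buildings_with_sunset (sequence : List Int) : Prop := sequence ≠ []
instance (sequence : List Int) : Decidable (Pre_examine_buildings_with_sunset sequence) := by unfold Pre_examine_buildings_with_sunset; infer_instance
def pvWitness_examine_buildings_with_sunset : List Int := [3, 1, 4, 1, 5]

def Spec_examine_buildings_with_sunset (sequence : List Int) (out : Int) : Prop := out = examine_buildings_with_sunset_alt sequence
instance (sequence : List Int) (out : Int) : Decidable (Spec_examine_buildings_with_sunset sequence out) := by unfold Spec_examine_buildings_with_sunset; infer_instance

-- ===== CLAIM (what is proved, stated in full; the proofs are below) =====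
def Claim_equal_examine_buildings_with_sunset : Prop := ∀ (sequence : List Int), Dom_examine_buildings_with_sunset sequence → Pre_examine_buildings_with_sunset sequence → Spec_examine_buildings_with_sunset sequence (examine_buildings_with_sunset sequence)

-- ===== LEMMAS AND PROOFS =====

-- the list of running prefix maxima starting from current max m (recursive form of B's loop)
def pmList (m : Int) : List Int → List Int
  | [] => []
  | x :: xs => max m x :: pmList (max m x) xs

-- the number of strict increases of the running max (recursive form of A's loop)
def incCount (m : Int) : List Int → Nat
  | [] => 0
  | x :: xs => if x > m then 1 + incCount x xs else incCount m xs

theorem fold_pm (l : List Int) : ∀ (m : Int) (acc : List Int),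
    (l.foldl (fun (acc : List Int × Int) x => (acc.1 ++ [max acc.2 x], max acc.2 x)) (acc, m)).1
      = acc ++ pmList m l := by
  induction l with
  | nil => intro m acc; simp [pmList]
  | cons x xs ih => intro m acc; simp [List.foldl, pmList, ih]

theorem fold_inc (l : List Int) : ∀ (m c : Int),
    (l.foldl (fun (st : Int × Int) x => if x > st.1 then (x, st.2 + 1) else st) (m, c)).2
      = c + (incCount m l : Int) := by
  induction l with
  | nil => intro m c; simp [incCount]
  | cons x xs ih =>
    intro m c
    by_cases h : x > m
    · simp [List.foldl, incCount, h, ih]; ring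
    · simp [List.foldl, incCount, h, ih]

theorem mem_pmList_ge {y m : Int} {l : List Int} (h : y ∈ pmList m l) : m ≤ y := by
  induction l generalizing m with
  | nil => simp [pmList] at h
  | cons x xs ih =>
    simp [pmList] at h
    rcases h with h | h
    · omega
    · exact le_trans (le_max_left m x) (ih h)

theorem foldl_add_cons (l : List Int) : ∀ (s : List Int) (a : Int), a ∉ l →
    l.foldl PySem.Set.add (a :: s) = a :: l.foldl PySem.Set.add s := by
  induction l with
  | nil => intro s a _; rfl
  | cons x xs ih =>
    intro s a hna
    simp at hna
    have hxa : (x == a) = false := beq_eq_false_iff_ne.mpr (fun h => hna.1 h.symm)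
    have hstep : PySem.Set.add (a :: s) x = a :: PySem.Set.add s x := by
      simp only [PySem.Set.add, PySem.Set.contains, List.contains_cons, hxa, Bool.false_or]
      split <;> simp
    simp only [List.foldl, hstep, ih _ a hna.2]

theorem ofList_cons_not_mem {a : Int} {l : List Int} (h : a ∉ l) :
    PySem.Set.ofList (a :: l) = a :: PySem.Set.ofList l := by
  simp only [PySem.Set.ofList_eq_foldl, List.foldl]
  have : PySem.Set.add ([] : List Int) a = [a] := by rfl
  rw [this, foldl_add_cons l [] a h]

theorem set_pm_len (l : List Int) : ∀ m : Int,
    (PySem.Set.ofList (m :: pmList m l)).length = 1 + incCount m l := by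
  induction l with
  | nil => intro m; simp [pmList, incCount]; rfl
  | cons x xs ih =>
    intro m
    by_cases h : x > m
    · have hmax : max m x = x := by omega
      have hnm : m ∉ x :: pmList x xs := by
        intro hmem
        simp at hmem
        rcases hmem with h' | h'
        · omega
        · have := mem_pmList_ge h'; omega
      rw [pmList, hmax, ofList_cons_not_mem hnm]
      simp [incCount, h, ih x]
      omega
    · have hmax : max m x = m := by omega
      have hdup : PySem.Set.ofList (m :: m :: pmList m xs) = PySem.Set.ofList (m :: pmList m xs) := by
        simp only [PySem.Set.ofList_eq_foldl, List.foldl]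
        have h1 : PySem.Set.add ([] : List Int) m = [m] := rfl
        have h2 : PySem.Set.add [m] m = [m] := by simp [PySem.Set.add, PySem.Set.contains]
        rw [h1, h2]
      rw [pmList, hmax, hdup, ih m]
      simp [incCount, h]

-- ===== VERDICT (by name: the statement is the Claim_ definition above) =====
theorem examine_buildings_with_sunset_spec : Claim_equal_examine_buildings_with_sunset := by
  intro sequence _ hpre
  unfold Spec_examine_buildings_with_sunset
  obtain ⟨h, t, rfl⟩ : ∃ h t, sequence = h :: t := by
    cases sequence with
    | nil => exact absurd rfl hpre
    | cons h t => exact ⟨h, t, rfl⟩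
  unfold examine_buildings_with_sunset examine_buildings_with_sunset_alt
  simp only []
  rw [PySem.List.foldl_pyRange_pyGetD' (h :: t) (0 : Int)
        (fun (st : Int × Int) v => if v > st.1 then (v, st.2 + 1) else st)
        (PySem.List.pyGetD (h :: t) 0 0, 1) (a := 1) (by omega)]
  simp only [Int.toNat_one, List.drop_succ_cons, List.drop_zero]
  have hget : PySem.List.pyGetD (h :: t) 0 (0 : Int) = h := PySem.List.pyGetD_zero_cons h t 0
  rw [hget, fold_inc t h 1]
  have hb : ((h :: t).foldl
      (fun (acc : List Int × Int) x => (acc.1 ++ [max acc.2 x], max acc.2 x)) ([], h)).1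
      = pmList h (h :: t) := by
    simpa using fold_pm (h :: t) h []
  rw [hb]
  have hpm : pmList h (h :: t) = h :: pmList h t := by simp [pmList]
  rw [hpm, set_pm_len t h]
  push_cast
  ring
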